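-- pv_equiv track=rewrite | github.com/eftales/CPP-Formator | cppformator.py | add_space
-- ===== SOURCE A (Python) =====
-- def add_space(line):
--     new_line = list(line)
--     current_type = None
--
--     if (line[0] == 'c'):
--         if (line[0:len("char")] == "char" ):
--             current_type = "char"
--         if (line[0:len("case")] == "case"):
--             current_type = "case"
--
--         elif (line[0:len("const")] == "const"):
--             current_type = "const"
--
--     elif (line[0] == 'd'):
--         if (line[0:len("double")] == "double"):
--             current_type = "double"
--
--     elif (line[0] == 'e'):
--         if (line[0:len("elseif")] == "elseif"):
--             current_type = "elseif"
--
--     elif (line[0] == 'f'):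
--         if (line[0:len("float")] == "float"):
--             current_type = "float"
--         elif (line[0:len("for(")] == "for("):
--             current_type = "for("
--
--     elif (line[0] == 'i'):
--         if (line[0:len("int")] == "int"):
--             current_type = "int"
--         if (line[0:len("ifstream")] == "ifstream"):
--             current_type = "ifstream"
--
--     elif (line[0] == 'l'):
--         if (line[0:len("long")] == "long"):
--             current_type = "long"
--
--
--     elif (line[0] == 'n'):
--         if (line[0:len("namespace")] == "namespace"):
--             current_type = "namespace"
--
--     elif (line[0] == 'o'):
--         if (line[0:len("ofstream")] == "ofstream"):
--             current_type = "ofstream"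
--
--
--     elif (line[0] == 'r'):
--         if (line[0:len("return")] == "return"):
--             current_type = "return"
--
--
--     elif (line[0] == 's'):
--         if (line[0:len("struct")] == "struct"):
--             current_type = "struct"
--         if (line[0:len("string")] == "string"):
--             current_type = "string"
--
--     elif (line[0] == 'u'):
--         if (line[0:len("using")] == "using"):
--             current_type = "using"
--         if (line[0:len("unsigned")] == "unsigned"):
--             current_type = "unsigned"
--
--     elif (line[0] == 'v'):
--         if (line[0:len("void")] == "void"):
--             current_type = "void"
--
--     if (current_type != None):
--         new_line[len(current_type):] = add_space(''.join(new_line[len(current_type):]))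
--         new_line.insert(len(current_type),' ')
--     return new_line
-- ===== SOURCE B (Python) =====
-- KEYWORDS = ["case", "const", "char", "double", "elseif", "float", "for(",
--             "ifstream", "int", "long", "namespace", "ofstream", "return",
--             "string", "struct", "unsigned", "using", "void"]
--
-- BY_FIRST = {}
-- for _kw in KEYWORDS:
--     BY_FIRST.setdefault(_kw[0], []).append(_kw)
--
--
-- def add_space(line):
--     out = []
--     rest = line
--     while True:
--         first = rest[0]
--         matched = None
--         for kw in BY_FIRST.get(first, []):
--             if rest[:len(kw)] == kw:
--                 matched = kw
--                 break
--         if matched is None: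
--             out.extend(rest)
--             return out
--         out.extend(matched)
--         out.append(' ')
--         rest = rest[len(matched):]
-- ===== Notes on version B (the rewrite author's own statement) =====
-- stated objective: idiomatic
-- what changed: Replaces A's head recursion through a 13-way nested if/elif cascade by an iterative while loop over the remaining suffix with an accumulator, dispatching through a dict from first letter to candidate keywords; Pre_ excludes the empty line and lines that are exactly a concatenation of the keywords, on which A raises IndexError.
import Mathlib
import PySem

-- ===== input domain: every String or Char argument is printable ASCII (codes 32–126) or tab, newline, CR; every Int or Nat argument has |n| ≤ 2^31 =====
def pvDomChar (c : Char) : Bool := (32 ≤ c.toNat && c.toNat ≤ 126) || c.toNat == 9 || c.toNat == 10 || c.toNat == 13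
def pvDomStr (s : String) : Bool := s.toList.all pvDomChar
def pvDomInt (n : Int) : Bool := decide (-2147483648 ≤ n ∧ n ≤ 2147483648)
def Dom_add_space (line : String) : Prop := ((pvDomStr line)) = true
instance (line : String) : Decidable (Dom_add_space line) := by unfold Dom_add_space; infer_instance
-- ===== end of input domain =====

-- B replaces A's head-recursive nested if/elif cascade by an iterative accumulator loop
-- dispatching through a first-letter → candidate-keywords table (objective: idiomatic; same cost).


-- ===== PORT A =====
-- Python's list(line): one-character strings (keywords are kept as char lists throughout)
def pvChar1 (c : Char) : String := String.ofList [c]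

-- line[0:len(kw)] == kw
def pvSliceEq (l : List Char) (kw : List Char) : Bool := l.take kw.length == kw

-- the nested if/elif cascade of A computing current_type
def pvCtA (l : List Char) : Option (List Char) :=
  match l with
  | [] => none                       -- line[0] raises IndexError here; excluded by Pre_
  | c :: _ =>
    if c == 'c' then
      let ct0 := if pvSliceEq l ['c','h','a','r'] then some ['c','h','a','r'] else none
      if pvSliceEq l ['c','a','s','e'] then some ['c','a','s','e']
      else if pvSliceEq l ['c','o','n','s','t'] then some ['c','o','n','s','t']
      else ct0
    else if c == 'd' then
      if pvSliceEq l ['d','o','u','b','l','e'] then some ['d','o','u','b','l','e'] else none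
    else if c == 'e' then
      if pvSliceEq l ['e','l','s','e','i','f'] then some ['e','l','s','e','i','f'] else none
    else if c == 'f' then
      if pvSliceEq l ['f','l','o','a','t'] then some ['f','l','o','a','t']
      else if pvSliceEq l ['f','o','r','('] then some ['f','o','r','('] else none
    else if c == 'i' then
      let ct0 := if pvSliceEq l ['i','n','t'] then some ['i','n','t'] else none
      if pvSliceEq l ['i','f','s','t','r','e','a','m'] then some ['i','f','s','t','r','e','a','m'] else ct0
    else if c == 'l' then
      if pvSliceEq l ['l','o','n','g'] then some ['l','o','n','g'] else none
    else if c == 'n' then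
      if pvSliceEq l ['n','a','m','e','s','p','a','c','e'] then some ['n','a','m','e','s','p','a','c','e'] else none
    else if c == 'o' then
      if pvSliceEq l ['o','f','s','t','r','e','a','m'] then some ['o','f','s','t','r','e','a','m'] else none
    else if c == 'r' then
      if pvSliceEq l ['r','e','t','u','r','n'] then some ['r','e','t','u','r','n'] else none
    else if c == 's' then
      let ct0 := if pvSliceEq l ['s','t','r','u','c','t'] then some ['s','t','r','u','c','t'] else none
      if pvSliceEq l ['s','t','r','i','n','g'] then some ['s','t','r','i','n','g'] else ct0
    else if c == 'u' then
      let ct0 := if pvSliceEq l ['u','s','i','n','g'] then some ['u','s','i','n','g'] else none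
      if pvSliceEq l ['u','n','s','i','g','n','e','d'] then some ['u','n','s','i','g','n','e','d'] else ct0
    else if c == 'v' then
      if pvSliceEq l ['v','o','i','d'] then some ['v','o','i','d'] else none
    else none

def add_space_core (l : List Char) : List String :=
  match h : pvCtA l with
  | none => l.map pvChar1
  | some kw =>
    if hk : 0 < kw.length then      -- termination guard only: pvCtA never yields an empty keyword
      (l.take kw.length).map pvChar1 ++ [" "] ++ add_space_core (l.drop kw.length)
    else l.map pvChar1
termination_by l.length
decreasing_by
  have hne : l ≠ [] := by intro e; subst e; simp [pvCtA] at h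
  have hl : 0 < l.length := List.length_pos_iff.mpr hne
  simp only [List.length_drop]; omega

def add_space (line : String) : List String := add_space_core line.toList

-- ===== PORT B =====
def pvKwTable : PySem.Dict Char (List (List Char)) :=
  PySem.Dict.mk
  [('c', [['c','a','s','e'], ['c','o','n','s','t'], ['c','h','a','r']]),
   ('d', [['d','o','u','b','l','e']]),
   ('e', [['e','l','s','e','i','f']]),
   ('f', [['f','l','o','a','t'], ['f','o','r','(']]),
   ('i', [['i','f','s','t','r','e','a','m'], ['i','n','t']]),
   ('l', [['l','o','n','g']]),
   ('n', [['n','a','m','e','s','p','a','c','e']]),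
   ('o', [['o','f','s','t','r','e','a','m']]),
   ('r', [['r','e','t','u','r','n']]),
   ('s', [['s','t','r','i','n','g'], ['s','t','r','u','c','t']]),
   ('u', [['u','n','s','i','g','n','e','d'], ['u','s','i','n','g']]),
   ('v', [['v','o','i','d']])]

-- the inner for-loop of B: first candidate whose slice matches
def pvFindKw (cands : List (List Char)) (rest : List Char) : Option (List Char) :=
  match cands with
  | [] => none
  | kw :: t => if rest.take kw.length == kw then some kw else pvFindKw t rest

-- the while-loop of B, over the remaining suffix and the accumulated output
def pvLoop (rest : List Char) (acc : List String) : List String :=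
  match rest with
  | [] => acc                        -- rest[0] raises IndexError here; excluded by Pre_
  | c :: tl =>
    match pvFindKw (PySem.Dict.getD pvKwTable c []) (c :: tl) with
    | none => acc ++ (c :: tl).map pvChar1
    | some kw =>
      if hk : 0 < kw.length then    -- termination guard only: matched keywords are nonempty
        pvLoop ((c :: tl).drop kw.length) (acc ++ kw.map pvChar1 ++ [" "])
      else acc
termination_by rest.length
decreasing_by simp only [List.length_drop, List.length_cons]; omega

def add_space_alt (line : String) : List String := pvLoop line.toList []

-- ===== PRECONDITION & SPEC =====
def pvAllKeywords : List (List Char) :=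
  [['c','a','s','e'], ['c','o','n','s','t'], ['c','h','a','r'], ['d','o','u','b','l','e'],
   ['e','l','s','e','i','f'], ['f','l','o','a','t'], ['f','o','r','('],
   ['i','f','s','t','r','e','a','m'], ['i','n','t'], ['l','o','n','g'],
   ['n','a','m','e','s','p','a','c','e'], ['o','f','s','t','r','e','a','m'],
   ['r','e','t','u','r','n'], ['s','t','r','i','n','g'], ['s','t','r','u','c','t'],
   ['u','n','s','i','g','n','e','d'], ['u','s','i','n','g'], ['v','o','i','d']]

def pvStripKw? (kws : List (List Char)) (l : List Char) : Option (List Char) :=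
  match kws with
  | [] => none
  | kw :: t => if kw.isPrefixOf l then some (l.drop kw.length) else pvStripKw? t l

-- membership test for the language KW*: is l a concatenation of zero or more keywords?
-- (the iteration count is bounded by the length: every keyword is nonempty)
def pvIsKwRunAux : Nat → List Char → Bool
  | _, [] => true
  | 0, _ :: _ => false
  | n + 1, c :: t =>
    match pvStripKw? pvAllKeywords (c :: t) with
    | none => false
    | some rest => pvIsKwRunAux n rest

def pvIsKwRun (l : List Char) : Bool := pvIsKwRunAux l.length l

-- Pre_ excludes exactly the lines that are a concatenation of zero or more of the C++ keywords
-- (the empty line and e.g. "int", "intchar"): on those Python A raises IndexError.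
def Pre_add_space (line : String) : Prop := pvIsKwRun line.toList = false
instance (line : String) : Decidable (Pre_add_space line) := by unfold Pre_add_space; infer_instance
def pvWitness_add_space : String := "int x"

def Spec_add_space (line : String) (out : List String) : Prop := out = add_space_alt line
instance (line : String) (out : List String) : Decidable (Spec_add_space line out) := by
  unfold Spec_add_space; infer_instance

-- ===== CLAIM (what is proved, stated in full; the proofs are below) =====
def Claim_equal_add_space : Prop :=
  ∀ (line : String), Dom_add_space line → Pre_add_space line →
    Spec_add_space line (add_space line)

-- ===== LEMMAS AND PROOFS =====
-- A's cascade and B's table lookup + candidate scan agree on every nonempty suffix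
lemma ct_eq (c : Char) (r : List Char) :
    pvFindKw (PySem.Dict.getD pvKwTable c []) (c :: r) = pvCtA (c :: r) := by
  by_cases h1 : c = 'c'; · subst h1; rfl
  by_cases h2 : c = 'd'; · subst h2; rfl
  by_cases h3 : c = 'e'; · subst h3; rfl
  by_cases h4 : c = 'f'; · subst h4; rfl
  by_cases h5 : c = 'i'; · subst h5; rfl
  by_cases h6 : c = 'l'; · subst h6; rfl
  by_cases h7 : c = 'n'; · subst h7; rfl
  by_cases h8 : c = 'o'; · subst h8; rfl
  by_cases h9 : c = 'r'; · subst h9; rfl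
  by_cases h10 : c = 's'; · subst h10; rfl
  by_cases h11 : c = 'u'; · subst h11; rfl
  by_cases h12 : c = 'v'; · subst h12; rfl
  have g1 : ('c' = c) = False := eq_false fun e => h1 e.symm
  have g2 : ('d' = c) = False := eq_false fun e => h2 e.symm
  have g3 : ('e' = c) = False := eq_false fun e => h3 e.symm
  have g4 : ('f' = c) = False := eq_false fun e => h4 e.symm
  have g5 : ('i' = c) = False := eq_false fun e => h5 e.symm
  have g6 : ('l' = c) = False := eq_false fun e => h6 e.symm
  have g7 : ('n' = c) = False := eq_false fun e => h7 e.symm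
  have g8 : ('o' = c) = False := eq_false fun e => h8 e.symm
  have g9 : ('r' = c) = False := eq_false fun e => h9 e.symm
  have g10 : ('s' = c) = False := eq_false fun e => h10 e.symm
  have g11 : ('u' = c) = False := eq_false fun e => h11 e.symm
  have g12 : ('v' = c) = False := eq_false fun e => h12 e.symm
  simp [pvCtA, pvKwTable, pvFindKw, PySem.Dict.getD, PySem.Dict.get?_mk_cons,
        h1, h2, h3, h4, h5, h6, h7, h8, h9, h10, h11, h12,
        g1, g2, g3, g4, g5, g6, g7, g8, g9, g10, g11, g12, PySem.Dict.get?]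

-- a matched keyword is nonempty and is the literal prefix of the suffix
lemma ctA_spec (l : List Char) (kw : List Char) (h : pvCtA l = some kw) :
    0 < kw.length ∧ l.take kw.length = kw := by
  cases l with
  | nil => simp [pvCtA] at h
  | cons c r =>
    unfold pvCtA at h
    simp only [pvSliceEq, beq_iff_eq] at h
    by_cases h1 : c = 'c'
    · rw [if_pos h1] at h
      split_ifs at h <;>
        first
          | (have hk' := Option.some.inj h; subst hk'; exact ⟨by simp, by assumption⟩)
          | simp at h
    rw [if_neg h1] at h
    by_cases h2 : c = 'd'
    · rw [if_pos h2] at h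
      split_ifs at h <;>
        first
          | (have hk' := Option.some.inj h; subst hk'; exact ⟨by simp, by assumption⟩)
          | simp at h
    rw [if_neg h2] at h
    by_cases h3 : c = 'e'
    · rw [if_pos h3] at h
      split_ifs at h <;>
        first
          | (have hk' := Option.some.inj h; subst hk'; exact ⟨by simp, by assumption⟩)
          | simp at h
    rw [if_neg h3] at h
    by_cases h4 : c = 'f'
    · rw [if_pos h4] at h
      split_ifs at h <;>
        first
          | (have hk' := Option.some.inj h; subst hk'; exact ⟨by simp, by assumption⟩)
          | simp at h
    rw [if_neg h4] at h
    by_cases h5 : c = 'i'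
    · rw [if_pos h5] at h
      split_ifs at h <;>
        first
          | (have hk' := Option.some.inj h; subst hk'; exact ⟨by simp, by assumption⟩)
          | simp at h
    rw [if_neg h5] at h
    by_cases h6 : c = 'l'
    · rw [if_pos h6] at h
      split_ifs at h <;>
        first
          | (have hk' := Option.some.inj h; subst hk'; exact ⟨by simp, by assumption⟩)
          | simp at h
    rw [if_neg h6] at h
    by_cases h7 : c = 'n'
    · rw [if_pos h7] at h
      split_ifs at h <;>
        first
          | (have hk' := Option.some.inj h; subst hk'; exact ⟨by simp, by assumption⟩)
          | simp at h
    rw [if_neg h7] at h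
    by_cases h8 : c = 'o'
    · rw [if_pos h8] at h
      split_ifs at h <;>
        first
          | (have hk' := Option.some.inj h; subst hk'; exact ⟨by simp, by assumption⟩)
          | simp at h
    rw [if_neg h8] at h
    by_cases h9 : c = 'r'
    · rw [if_pos h9] at h
      split_ifs at h <;>
        first
          | (have hk' := Option.some.inj h; subst hk'; exact ⟨by simp, by assumption⟩)
          | simp at h
    rw [if_neg h9] at h
    by_cases h10 : c = 's'
    · rw [if_pos h10] at h
      split_ifs at h <;>
        first
          | (have hk' := Option.some.inj h; subst hk'; exact ⟨by simp, by assumption⟩)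
          | simp at h
    rw [if_neg h10] at h
    by_cases h11 : c = 'u'
    · rw [if_pos h11] at h
      split_ifs at h <;>
        first
          | (have hk' := Option.some.inj h; subst hk'; exact ⟨by simp, by assumption⟩)
          | simp at h
    rw [if_neg h11] at h
    by_cases h12 : c = 'v'
    · rw [if_pos h12] at h
      split_ifs at h <;>
        first
          | (have hk' := Option.some.inj h; subst hk'; exact ⟨by simp, by assumption⟩)
          | simp at h
    rw [if_neg h12] at h
    simp at h

lemma loop_eq (n : Nat) : ∀ (l : List Char) (acc : List String),
    l.length ≤ n → pvLoop l acc = acc ++ add_space_core l := by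
  induction n with
  | zero =>
    intro l acc h
    have : l = [] := by cases l <;> simp_all
    subst this
    simp [pvLoop, add_space_core, pvCtA]
  | succ n ih =>
    intro l acc h
    cases l with
    | nil => simp [pvLoop, add_space_core, pvCtA]
    | cons c r =>
      rw [pvLoop, add_space_core, ct_eq c r]
      cases hct : pvCtA (c :: r) with
      | none => simp
      | some kw =>
        obtain ⟨hpos, hpre⟩ := ctA_spec _ _ hct
        simp only [dif_pos hpos, hpre]
        rw [ih ((c :: r).drop kw.length) _ (by
          simp only [List.length_drop, List.length_cons]
          simp only [List.length_cons] at h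
          omega)]
        simp [List.append_assoc]

-- ===== VERDICT (by name: the statement is the Claim_ definition above) =====
theorem add_space_spec : Claim_equal_add_space := by
  intro line _ _
  unfold Spec_add_space add_space add_space_alt
  rw [loop_eq line.toList.length line.toList [] le_rfl, List.nil_append]
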